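-- pv_equiv track=rewrite | github.com/TomKite57/advent_of_code_2024 | scripts/day_24.py | get_correct_gates_from_out_names
-- ===== SOURCE A (Python) =====
-- def get_correct_gates_from_out_names(gates, out_names):
--     correct_gates = set()
--     correct_wires = set(out_names)
--     num_correct = len(correct_wires)
--
--     while True:
--         for i, (w1, g, w2, out) in enumerate(gates):
--             if out in correct_wires:
--                 correct_gates.add(i)
--                 correct_wires.add(w1)
--                 correct_wires.add(w2)
--         if len(correct_wires) == num_correct:
--             break
--         num_correct = len(correct_wires)
--
--     return sorted(list(correct_gates))
-- ===== SOURCE B (Python) =====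
-- def get_correct_gates_from_out_names(gates, out_names):
--     by_out = {}
--     for w1, g, w2, out in gates:
--         by_out[out] = by_out.get(out, []) + [(w1, w2)]
--     seen = set()
--     stack = []
--     for w in out_names:
--         if w not in seen:
--             seen.add(w)
--             stack.append(w)
--     while stack:
--         w = stack.pop()
--         for w1, w2 in by_out.get(w, []):
--             for x in (w1, w2):
--                 if x not in seen:
--                     seen.add(x)
--                     stack.append(x)
--     return [i for i, (w1, g, w2, out) in enumerate(gates) if out in seen]
-- ===== Notes on version B (the rewrite author's own statement) =====
-- stated objective: alternative
-- what changed: Replaces A's repeated full-scan fixpoint passes over all gates with a one-pass index (output wire -> gate-input pairs) plus a worklist traversal over wires, then a single ordered collection pass over the gates (no sort needed).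
import Mathlib
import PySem

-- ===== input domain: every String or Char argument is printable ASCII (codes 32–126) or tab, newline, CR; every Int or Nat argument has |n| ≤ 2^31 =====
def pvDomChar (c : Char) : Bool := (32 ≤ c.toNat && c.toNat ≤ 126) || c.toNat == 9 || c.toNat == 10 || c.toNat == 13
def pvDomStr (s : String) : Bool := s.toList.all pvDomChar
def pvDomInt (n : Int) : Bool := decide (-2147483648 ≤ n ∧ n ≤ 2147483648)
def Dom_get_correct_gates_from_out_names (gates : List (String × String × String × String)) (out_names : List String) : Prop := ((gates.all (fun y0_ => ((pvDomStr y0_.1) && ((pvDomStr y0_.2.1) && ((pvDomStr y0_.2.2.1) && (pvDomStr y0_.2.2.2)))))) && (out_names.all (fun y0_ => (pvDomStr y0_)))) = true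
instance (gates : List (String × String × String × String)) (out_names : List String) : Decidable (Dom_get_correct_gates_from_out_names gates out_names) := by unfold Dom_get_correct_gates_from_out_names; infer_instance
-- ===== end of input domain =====

-- B replaces A's repeated full-scan fixpoint passes with an output-wire index + worklist
-- traversal and one ordered collection pass (objective: alternative algorithm, no sort needed).

-- ===== PORT A =====
-- one step of A's inner 'for i, (w1, g, w2, out) in enumerate(gates)' loop
def pvStepA (st : PySem.Set Int × PySem.Set String) (p : Int × (String × String × String × String)) :
    PySem.Set Int × PySem.Set String :=
  if PySem.Set.contains st.2 p.2.2.2.2 then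
    (PySem.Set.add st.1 p.1, PySem.Set.add (PySem.Set.add st.2 p.2.1) p.2.2.2.1)
  else st

-- wires that a pass can ever add (w1's and w2's); used only for the termination measure
def pvWiresA (gates : List (String × String × String × String)) : List String :=
  gates.flatMap (fun g => [g.1, g.2.2.1])

-- termination helpers: filtering with a pointwise-stronger predicate is no longer, and strictly
-- shorter once a witness is lost
theorem pv_filter_length_le {α : Type} {p q : α → Bool} {l : List α}
    (h : ∀ x ∈ l, q x = true → p x = true) :
    (l.filter q).length ≤ (l.filter p).length := by
  induction l with
  | nil => simp
  | cons a t ih =>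
    have hmono : ∀ x ∈ t, q x = true → p x = true := fun x hx => h x (List.mem_cons_of_mem a hx)
    have ht := ih hmono
    by_cases hq : q a = true
    · have hp : p a = true := h a (List.mem_cons_self) hq
      simp [hq, hp]; omega
    · have hq' : q a = false := by simpa using hq
      by_cases hp : p a = true <;> simp [hq', hp] <;> omega

theorem pv_filter_length_lt {α : Type} {p q : α → Bool} {l : List α}
    (h : ∀ x ∈ l, q x = true → p x = true) {w : α} (hw : w ∈ l)
    (hpw : p w = true) (hqw : q w = false) :
    (l.filter q).length < (l.filter p).length := by
  induction l with
  | nil => cases hw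
  | cons a t ih =>
    have hmono : ∀ x ∈ t, q x = true → p x = true := fun x hx => h x (List.mem_cons_of_mem a hx)
    rcases List.mem_cons.mp hw with rfl | hwt
    · have ht := pv_filter_length_le hmono
      simp [hqw, hpw]; omega
    · have ht := ih hmono hwt
      by_cases hq : q a = true
      · have hp : p a = true := h a (List.mem_cons_self) hq
        simp [hq, hp]; omega
      · have hq' : q a = false := by simpa using hq
        by_cases hp : p a = true <;> simp [hq', hp] <;> omega

-- one step of A's pass appends only new wires (w1/w2 of the gate) to the wire set
theorem pvStepA_ext (st : PySem.Set Int × PySem.Set String) (p : Int × (String × String × String × String)) :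
    ∃ t, (pvStepA st p).2 = st.2 ++ t ∧ ∀ w ∈ t, w ∉ st.2 ∧ (w = p.2.1 ∨ w = p.2.2.2.1) := by
  by_cases h : p.2.2.2.2 ∈ st.2
  · by_cases h1 : p.2.1 ∈ st.2
    · by_cases h2 : p.2.2.2.1 ∈ st.2
      · exact ⟨[], by simp [pvStepA, PySem.Set.add, h, h1, h2]⟩
      · refine ⟨[p.2.2.2.1], by simp [pvStepA, PySem.Set.add, h, h1, h2], ?_⟩
        intro w hw; have hww := List.mem_singleton.mp hw; subst hww
        exact ⟨h2, Or.inr rfl⟩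
    · by_cases h2 : p.2.2.2.1 ∈ st.2 ++ [p.2.1]
      · refine ⟨[p.2.1], by simp [pvStepA, PySem.Set.add, h, h1, h2], ?_⟩
        intro w hw; have hww := List.mem_singleton.mp hw; subst hww
        exact ⟨h1, Or.inl rfl⟩
      · refine ⟨[p.2.1, p.2.2.2.1], by simp [pvStepA, PySem.Set.add, h, h1, h2], ?_⟩
        intro w hw
        rcases List.mem_cons.mp hw with hww | hw
        · subst hww; exact ⟨h1, Or.inl rfl⟩
        · have hww := List.mem_singleton.mp hw; subst hww
          exact ⟨fun hx => h2 (List.mem_append_left _ hx), Or.inr rfl⟩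
  · exact ⟨[], by simp [pvStepA, h]⟩

-- a whole pass of A appends only new wires, each a w1/w2 of some scanned gate
theorem pvPassA_ext (l : List (Int × (String × String × String × String)))
    (st : PySem.Set Int × PySem.Set String) :
    ∃ t, (l.foldl pvStepA st).2 = st.2 ++ t ∧
      ∀ w ∈ t, w ∉ st.2 ∧ ∃ p ∈ l, w = p.2.1 ∨ w = p.2.2.2.1 := by
  induction l generalizing st with
  | nil => exact ⟨[], by simp⟩
  | cons p l ih =>
    obtain ⟨t1, ht1, hn1⟩ := pvStepA_ext st p
    obtain ⟨t2, ht2, hn2⟩ := ih (pvStepA st p)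
    refine ⟨t1 ++ t2, ?_, ?_⟩
    · simp [ht2, ht1]
    · intro w hw
      rcases List.mem_append.mp hw with hw | hw
      · obtain ⟨hnm, hor⟩ := hn1 w hw
        exact ⟨hnm, p, List.mem_cons_self, hor⟩
      · obtain ⟨hnm, q, hq, hor⟩ := hn2 w hw
        rw [ht1] at hnm
        exact ⟨fun hx => hnm (List.mem_append_left _ hx), q, List.mem_cons_of_mem _ hq, hor⟩

def pvMeasA (gates : List (String × String × String × String)) (cw : PySem.Set String) : Nat :=
  ((pvWiresA gates).filter (fun w => !(PySem.Set.contains cw w))).length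

theorem pvLoopA_dec (gates : List (String × String × String × String))
    (st : PySem.Set Int × PySem.Set String)
    (h : ¬ ((PySem.List.enumerate gates).foldl pvStepA st).2.length = st.2.length) :
    pvMeasA gates ((PySem.List.enumerate gates).foldl pvStepA st).2 < pvMeasA gates st.2 := by
  obtain ⟨t, ht, hn⟩ := pvPassA_ext (PySem.List.enumerate gates) st
  rcases t with _ | ⟨w, t⟩
  · simp [ht] at h
  · obtain ⟨hnm, p, hp, hor⟩ := hn w List.mem_cons_self
    have hwU : w ∈ pvWiresA gates := by
      obtain ⟨k, hk, hpk⟩ := (PySem.List.mem_enumerate_iff _ _ _).mp hp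
      subst hpk
      have hg : gates[k] ∈ gates := List.getElem_mem hk
      unfold pvWiresA
      refine List.mem_flatMap.mpr ⟨gates[k], hg, ?_⟩
      rcases hor with rfl | rfl <;> simp
    have hwin : w ∈ ((PySem.List.enumerate gates).foldl pvStepA st).2 :=
      ht ▸ List.mem_append_right _ List.mem_cons_self
    unfold pvMeasA
    refine pv_filter_length_lt ?_ hwU ?_ ?_
    · intro x _ hx
      simp only [Bool.not_eq_eq_eq_not, Bool.not_true] at hx ⊢
      rcases hq : PySem.Set.contains st.2 x with _ | _
      · rfl
      · exact absurd (ht ▸ List.mem_append_left _ ((PySem.Set.contains_iff _ _).mp hq))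
          (by simpa [PySem.Set.contains_iff] using hx)
    · simp only [Bool.not_eq_true']
      rcases hq : PySem.Set.contains st.2 w with _ | _
      · rfl
      · exact absurd ((PySem.Set.contains_iff _ _).mp hq) hnm
    · simpa [PySem.Set.contains_iff] using hwin

-- A's 'while True' loop: re-scan all gates until the wire set stops growing
def pvLoopA (gates : List (String × String × String × String))
    (st : PySem.Set Int × PySem.Set String) : PySem.Set Int :=
  let st' := (PySem.List.enumerate gates).foldl pvStepA st
  if st'.2.length = st.2.length then st'.1 else pvLoopA gates st'
termination_by pvMeasA gates st.2
decreasing_by exact pvLoopA_dec gates st (by assumption)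

def get_correct_gates_from_out_names (gates : List (String × String × String × String))
    (out_names : List String) : List Int :=
  PySem.List.sorted (pvLoopA gates (PySem.Set.empty, PySem.Set.ofList out_names)) (fun x => x) false

-- ===== PORT B =====
-- Source B's 'if x not in seen: seen.add(x); stack.append(x)' (the stack is held top-first)
def pvStep2 (st : PySem.Set String × List String) (x : String) : PySem.Set String × List String :=
  if PySem.Set.contains st.1 x then st else (PySem.Set.add st.1 x, x :: st.2)

-- Source B's inner 'for w1, w2 in by_out.get(w, []): for x in (w1, w2): …'
def pvProcess (prs : List (String × String)) (st : PySem.Set String × List String) :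
    PySem.Set String × List String :=
  prs.foldl (fun st pr => [pr.1, pr.2].foldl pvStep2 st) st

-- all wires the worklist loop can ever push; used only for the termination measure
def pvUB (byOut : PySem.Dict String (List (String × String))) : List String :=
  byOut.values.flatMap (fun l => l.flatMap (fun pr => [pr.1, pr.2]))

def pvMeasB (byOut : PySem.Dict String (List (String × String))) (seen : PySem.Set String) : Nat :=
  ((pvUB byOut).filter (fun w => !(PySem.Set.contains seen w))).length

-- one guarded push appends only a new wire; no push leaves the state unchanged
theorem pvStep2_ext (st : PySem.Set String × List String) (x : String) :
    ∃ t, (pvStep2 st x).1 = st.1 ++ t ∧ (∀ w ∈ t, w ∉ st.1 ∧ w = x) ∧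
      (t = [] → pvStep2 st x = st) := by
  by_cases h : x ∈ st.1
  · exact ⟨[], by simp [pvStep2, h], by simp, fun _ => by simp [pvStep2, h]⟩
  · refine ⟨[x], by simp [pvStep2, PySem.Set.add, h], ?_, by simp⟩
    intro w hw; have hww := List.mem_singleton.mp hw; subst hww
    exact ⟨h, rfl⟩

-- processing a popped wire's gate list appends only new wires drawn from those gates' inputs
theorem pvProcess_ext (prs : List (String × String)) (st : PySem.Set String × List String) :
    ∃ t, (pvProcess prs st).1 = st.1 ++ t ∧
      (∀ w ∈ t, w ∉ st.1 ∧ ∃ pr ∈ prs, w = pr.1 ∨ w = pr.2) ∧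
      (t = [] → pvProcess prs st = st) := by
  induction prs generalizing st with
  | nil => exact ⟨[], by simp [pvProcess], by simp, fun _ => by simp [pvProcess]⟩
  | cons pr prs ih =>
    have hstep : pvProcess (pr :: prs) st = pvProcess prs (pvStep2 (pvStep2 st pr.1) pr.2) := by
      simp [pvProcess, List.foldl]
    obtain ⟨t1, e1, n1, z1⟩ := pvStep2_ext st pr.1
    obtain ⟨t2, e2, n2, z2⟩ := pvStep2_ext (pvStep2 st pr.1) pr.2
    obtain ⟨t3, e3, n3, z3⟩ := ih (pvStep2 (pvStep2 st pr.1) pr.2)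
    refine ⟨(t1 ++ t2) ++ t3, ?_, ?_, ?_⟩
    · rw [hstep, e3, e2, e1]; simp
    · intro w hw
      rcases List.mem_append.mp hw with hw | hw
      · rcases List.mem_append.mp hw with hw | hw
        · obtain ⟨hn, he⟩ := n1 w hw
          exact ⟨hn, pr, List.mem_cons_self, Or.inl he⟩
        · obtain ⟨hn, he⟩ := n2 w hw
          rw [e1] at hn
          exact ⟨fun hx => hn (List.mem_append_left _ hx), pr, List.mem_cons_self, Or.inr he⟩
      · obtain ⟨hn, q, hq, he⟩ := n3 w hw
        rw [e2, e1] at hn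
        exact ⟨fun hx => hn (List.mem_append_left _ (List.mem_append_left _ hx)),
          q, List.mem_cons_of_mem _ hq, he⟩
    · intro hz
      rcases List.append_eq_nil_iff.mp hz with ⟨hz12, hz3⟩
      rcases List.append_eq_nil_iff.mp hz12 with ⟨hz1, hz2⟩
      rw [hstep, z3 hz3, z2 hz2, z1 hz1]

-- any pair stored in the index is drawn from the index's values (for the termination measure)
theorem pv_getD_sub_UB (byOut : PySem.Dict String (List (String × String))) (w : String)
    {pr : String × String} (hpr : pr ∈ byOut.getD w []) :
    pr.1 ∈ pvUB byOut ∧ pr.2 ∈ pvUB byOut := by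
  rcases hg : byOut.get? w with _ | v
  · rw [PySem.Dict.getD_eq_get?_getD, hg] at hpr; cases hpr
  · rw [PySem.Dict.getD_eq_get?_getD, hg] at hpr
    have hv : v ∈ byOut.values := by
      have hit := PySem.Dict.mem_items_of_get?_eq_some _ hg
      simp only [PySem.Dict.values]
      exact List.mem_map.mpr ⟨(w, v), hit, rfl⟩
    constructor <;>
      exact List.mem_flatMap.mpr ⟨v, hv, List.mem_flatMap.mpr ⟨pr, hpr, by simp⟩⟩

theorem pvBFS_dec (byOut : PySem.Dict String (List (String × String)))
    (seen : PySem.Set String) (w : String) (rest : List String) :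
    Prod.Lex (· < ·) (· < ·)
      (pvMeasB byOut (pvProcess (byOut.getD w []) (seen, rest)).1,
        (pvProcess (byOut.getD w []) (seen, rest)).2.length)
      (pvMeasB byOut seen, (rest.length + 1)) := by
  obtain ⟨t, e, n, z⟩ := pvProcess_ext (byOut.getD w []) (seen, rest)
  rcases t with _ | ⟨x, t⟩
  · rw [z rfl]
    exact Prod.Lex.right _ (by simp)
  · obtain ⟨hnm, pr, hpr, hor⟩ := n x List.mem_cons_self
    have hxU : x ∈ pvUB byOut := by
      have := pv_getD_sub_UB byOut w hpr
      rcases hor with rfl | rfl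
      · exact this.1
      · exact this.2
    have hxin : x ∈ (pvProcess (byOut.getD w []) (seen, rest)).1 :=
      e ▸ List.mem_append_right _ List.mem_cons_self
    refine Prod.Lex.left _ _ ?_
    unfold pvMeasB
    refine pv_filter_length_lt ?_ hxU ?_ ?_
    · intro y _ hy
      simp only [Bool.not_eq_true'] at hy ⊢
      rcases hq : PySem.Set.contains seen y with _ | _
      · rfl
      · exact absurd (e ▸ List.mem_append_left _ ((PySem.Set.contains_iff _ _).mp hq))
          (by simpa [PySem.Set.contains_iff] using hy)
    · simp only [Bool.not_eq_true']
      rcases hq : PySem.Set.contains seen x with _ | _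
      · rfl
      · exact absurd ((PySem.Set.contains_iff _ _).mp hq) hnm
    · simpa [PySem.Set.contains_iff] using hxin

-- Source B's 'while stack:' loop
def pvBFS (byOut : PySem.Dict String (List (String × String)))
    (st : PySem.Set String × List String) : PySem.Set String :=
  match st with
  | (seen, []) => seen
  | (seen, w :: rest) => pvBFS byOut (pvProcess (byOut.getD w []) (seen, rest))
termination_by (pvMeasB byOut st.1, st.2.length)
decreasing_by simpa using pvBFS_dec byOut seen w rest

def get_correct_gates_from_out_names_alt (gates : List (String × String × String × String))
    (out_names : List String) : List Int :=
  let byOut := gates.foldl (fun d g => d.modify g.2.2.2 [] (· ++ [(g.1, g.2.2.1)])) PySem.Dict.empty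
  let seen := pvBFS byOut (out_names.foldl pvStep2 (PySem.Set.empty, []))
  (PySem.List.enumerate gates).foldl
    (fun acc p => if PySem.Set.contains seen p.2.2.2.2 then acc ++ [p.1] else acc) []

-- ===== PRECONDITION & SPEC =====
def Spec_get_correct_gates_from_out_names (gates : List (String × String × String × String)) (out_names : List String) (out : List Int) : Prop := out = get_correct_gates_from_out_names_alt gates out_names
instance (gates : List (String × String × String × String)) (out_names : List String) (out : List Int) : Decidable (Spec_get_correct_gates_from_out_names gates out_names out) := by unfold Spec_get_correct_gates_from_out_names; infer_instance

-- ===== CLAIM (what is proved, stated in full; the proofs are below) =====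
def Claim_equal_get_correct_gates_from_out_names : Prop := ∀ (gates : List (String × String × String × String)) (out_names : List String), Dom_get_correct_gates_from_out_names gates out_names → Spec_get_correct_gates_from_out_names gates out_names (get_correct_gates_from_out_names gates out_names)

-- ===== LEMMAS AND PROOFS =====

-- the wires backward-reachable from the output names through the gates
inductive pvReach (gates : List (String × String × String × String)) (outs : List String) :
    String → Prop
  | base (w : String) (h : w ∈ outs) : pvReach gates outs w
  | left (g : String × String × String × String) (hg : g ∈ gates)
      (h : pvReach gates outs g.2.2.2) : pvReach gates outs g.1
  | right (g : String × String × String × String) (hg : g ∈ gates)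
      (h : pvReach gates outs g.2.2.2) : pvReach gates outs g.2.2.1

-- gate indices whose output wire is reachable
def pvQ (gates : List (String × String × String × String)) (outs : List String) (i : Int) : Prop :=
  ∃ (k : Nat), ∃ _ : k < gates.length, i = (k : Int) ∧ pvReach gates outs (gates[k].2.2.2)

-- a set containing the output names and closed under gate steps contains every reachable wire
theorem pvReach_mem (gates : List (String × String × String × String)) (outs : List String)
    (W : List String) (hb : ∀ w ∈ outs, w ∈ W)
    (hc : ∀ g ∈ gates, g.2.2.2 ∈ W → g.1 ∈ W ∧ g.2.2.1 ∈ W) :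
    ∀ w, pvReach gates outs w → w ∈ W := by
  intro w h
  induction h with
  | base w hw => exact hb w hw
  | left g hg _ ih => exact (hc g hg ih).1
  | right g hg _ ih => exact (hc g hg ih).2

theorem pv_add_eq_self {α : Type} [BEq α] [LawfulBEq α] (s : PySem.Set α) (x : α) :
    PySem.Set.add s x = s ↔ x ∈ s := by
  constructor
  · intro h
    by_cases hx : x ∈ s
    · exact hx
    · exfalso
      have : s ++ [x] = s := by
        rw [PySem.Set.add] at h
        rwa [if_neg (by simpa [PySem.Set.contains_iff] using hx)] at h
      have := congrArg List.length this
      simp at this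
  · intro h; simp [PySem.Set.add, h]

theorem pv_add_length_ge {α : Type} [BEq α] (s : PySem.Set α) (x : α) :
    s.length ≤ (PySem.Set.add s x).length := by
  unfold PySem.Set.add
  split <;> simp

-- ---- A-side correctness ----

theorem pvPassA_sound (gates : List (String × String × String × String)) (outs : List String) :
    ∀ (l : List (Int × (String × String × String × String))) (st : PySem.Set Int × PySem.Set String),
    (∀ p ∈ l, ∃ (k : Nat), ∃ _ : k < gates.length, p = ((k : Int), gates[k])) →
    (∀ w ∈ st.2, pvReach gates outs w) → (∀ i ∈ st.1, pvQ gates outs i) →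
    (∀ w ∈ (l.foldl pvStepA st).2, pvReach gates outs w) ∧
      (∀ i ∈ (l.foldl pvStepA st).1, pvQ gates outs i) := by
  intro l
  induction l with
  | nil => intro st _ h2 h3; exact ⟨h2, h3⟩
  | cons p l ih =>
    intro st hl h2 h3
    obtain ⟨k, hk, hpk⟩ := hl p List.mem_cons_self
    have hgmem : gates[k] ∈ gates := List.getElem_mem hk
    have hstep2 : ∀ w ∈ (pvStepA st p).2, pvReach gates outs w := by
      intro w hw
      by_cases h : p.2.2.2.2 ∈ st.2
      · simp only [pvStepA] at hw
        rw [if_pos (by simpa [PySem.Set.contains_iff] using h)] at hw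
        have hout : pvReach gates outs (gates[k].2.2.2) := by
          have := h2 p.2.2.2.2 h
          simpa [hpk] using this
        rcases (PySem.Set.mem_add _ _ _).mp hw with hw | rfl
        · rcases (PySem.Set.mem_add _ _ _).mp hw with hw | rfl
          · exact h2 w hw
          · simpa [hpk] using pvReach.left gates[k] hgmem hout
        · simpa [hpk] using pvReach.right gates[k] hgmem hout
      · simp only [pvStepA] at hw
        rw [if_neg (by simpa [PySem.Set.contains_iff] using h)] at hw
        exact h2 w hw
    have hstep1 : ∀ i ∈ (pvStepA st p).1, pvQ gates outs i := by
      intro i hi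
      by_cases h : p.2.2.2.2 ∈ st.2
      · simp only [pvStepA] at hi
        rw [if_pos (by simpa [PySem.Set.contains_iff] using h)] at hi
        rcases (PySem.Set.mem_add _ _ _).mp hi with hi | rfl
        · exact h3 i hi
        · have hout : pvReach gates outs (gates[k].2.2.2) := by
            have := h2 p.2.2.2.2 h
            simpa [hpk] using this
          exact ⟨k, hk, by simp [hpk], hout⟩
      · simp only [pvStepA] at hi
        rw [if_neg (by simpa [PySem.Set.contains_iff] using h)] at hi
        exact h3 i hi
    exact ih (pvStepA st p) (fun q hq => hl q (List.mem_cons_of_mem _ hq)) hstep2 hstep1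

theorem pvPassA_fix :
    ∀ (l : List (Int × (String × String × String × String)))
      (cg : PySem.Set Int) (cw : PySem.Set String),
    (l.foldl pvStepA (cg, cw)).2 = cw →
    (∀ p ∈ l, p.2.2.2.2 ∈ cw → p.2.1 ∈ cw ∧ p.2.2.2.1 ∈ cw) ∧
      (∀ i, i ∈ (l.foldl pvStepA (cg, cw)).1 ↔ i ∈ cg ∨ ∃ p ∈ l, i = p.1 ∧ p.2.2.2.2 ∈ cw) := by
  intro l
  induction l with
  | nil => intro cg cw _; exact ⟨by simp, by simp⟩
  | cons p l ih =>
    intro cg cw hfix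
    by_cases h : p.2.2.2.2 ∈ cw
    · have hstep : pvStepA (cg, cw) p =
          (PySem.Set.add cg p.1, PySem.Set.add (PySem.Set.add cw p.2.1) p.2.2.2.1) := by
        simp only [pvStepA]
        rw [if_pos (by simpa [PySem.Set.contains_iff] using h)]
      -- the wire set cannot shrink, so the final equality forces both adds to be no-ops
      obtain ⟨t, ht, _⟩ := pvPassA_ext l (pvStepA (cg, cw) p)
      have hsnd : (pvStepA (cg, cw) p).2 = PySem.Set.add (PySem.Set.add cw p.2.1) p.2.2.2.1 := by
        rw [hstep]
      have hfold : (l.foldl pvStepA (pvStepA (cg, cw) p)).2 = cw := by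
        simpa [List.foldl_cons] using hfix
      rw [hfold] at ht
      have hlen1 : cw.length ≤ (PySem.Set.add cw p.2.1).length := pv_add_length_ge cw _
      have hlen2 : (PySem.Set.add cw p.2.1).length ≤
          (PySem.Set.add (PySem.Set.add cw p.2.1) p.2.2.2.1).length := pv_add_length_ge _ _
      have hlen : (PySem.Set.add (PySem.Set.add cw p.2.1) p.2.2.2.1).length = cw.length := by
        have := congrArg List.length ht
        rw [hsnd] at this
        simp at this
        omega
      have hadd1 : PySem.Set.add cw p.2.1 = cw := by
        by_cases h1 : p.2.1 ∈ cw
        · simp [PySem.Set.add, h1]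
        · exfalso
          have : (PySem.Set.add cw p.2.1).length = cw.length + 1 := by
            simp [PySem.Set.add, h1]
          omega
      have hw1 : p.2.1 ∈ cw := (pv_add_eq_self _ _).mp hadd1
      have hadd2 : PySem.Set.add (PySem.Set.add cw p.2.1) p.2.2.2.1 = cw := by
        rw [hadd1] at hlen ⊢
        by_cases h2 : p.2.2.2.1 ∈ cw
        · simp [PySem.Set.add, h2]
        · exfalso
          have : (PySem.Set.add cw p.2.2.2.1).length = cw.length + 1 := by
            simp [PySem.Set.add, h2]
          omega
      have hw2 : p.2.2.2.1 ∈ cw := by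
        rw [hadd1] at hadd2
        exact (pv_add_eq_self _ _).mp hadd2
      have hstate : pvStepA (cg, cw) p = (PySem.Set.add cg p.1, cw) := by
        rw [hstep, hadd2]
      have hfix' : (l.foldl pvStepA (PySem.Set.add cg p.1, cw)).2 = cw := by
        rw [← hstate]
        simpa [List.foldl_cons] using hfix
      obtain ⟨ihc, ihm⟩ := ih (PySem.Set.add cg p.1) cw hfix'
      constructor
      · intro q hq hqout
        rcases List.mem_cons.mp hq with rfl | hq
        · exact ⟨hw1, hw2⟩
        · exact ihc q hq hqout
      · intro i
        have : (List.foldl pvStepA (cg, cw) (p :: l)).1 =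
            (l.foldl pvStepA (PySem.Set.add cg p.1, cw)).1 := by
          rw [List.foldl_cons, hstate]
        rw [this, ihm i]
        constructor
        · rintro (hi | ⟨q, hq, hiq⟩)
          · rcases (PySem.Set.mem_add _ _ _).mp hi with hi | rfl
            · exact Or.inl hi
            · exact Or.inr ⟨p, List.mem_cons_self, rfl, h⟩
          · exact Or.inr ⟨q, List.mem_cons_of_mem _ hq, hiq⟩
        · rintro (hi | ⟨q, hq, hiq, hqout⟩)
          · exact Or.inl ((PySem.Set.mem_add _ _ _).mpr (Or.inl hi))
          · rcases List.mem_cons.mp hq with rfl | hq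
            · exact Or.inl ((PySem.Set.mem_add _ _ _).mpr (Or.inr hiq))
            · exact Or.inr ⟨q, hq, hiq, hqout⟩
    · have hstate : pvStepA (cg, cw) p = (cg, cw) := by
        simp only [pvStepA]
        rw [if_neg (by simpa [PySem.Set.contains_iff] using h)]
      have hfix' : (l.foldl pvStepA (cg, cw)).2 = cw := by
        have := hfix
        rw [List.foldl_cons, hstate] at this
        exact this
      obtain ⟨ihc, ihm⟩ := ih cg cw hfix'
      have hnot : p.2.2.2.2 ∉ cw := h
      constructor
      · intro q hq hqout
        rcases List.mem_cons.mp hq with rfl | hq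
        · exact absurd hqout hnot
        · exact ihc q hq hqout
      · intro i
        have : (List.foldl pvStepA (cg, cw) (p :: l)).1 = (l.foldl pvStepA (cg, cw)).1 := by
          rw [List.foldl_cons, hstate]
        rw [this, ihm i]
        constructor
        · rintro (hi | ⟨q, hq, hiq⟩)
          · exact Or.inl hi
          · exact Or.inr ⟨q, List.mem_cons_of_mem _ hq, hiq⟩
        · rintro (hi | ⟨q, hq, hiq, hqout⟩)
          · exact Or.inl hi
          · rcases List.mem_cons.mp hq with rfl | hq
            · exact absurd hqout hnot
            · exact Or.inr ⟨q, hq, hiq, hqout⟩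

theorem pvLoopA_nodup (gates : List (String × String × String × String)) :
    ∀ st : PySem.Set Int × PySem.Set String, st.1.Nodup → (pvLoopA gates st).Nodup := by
  intro st
  induction st using pvLoopA.induct gates with
  | case1 st st' hlen =>
    intro h1
    have hfold : ∀ (l : List (Int × (String × String × String × String)))
        (st : PySem.Set Int × PySem.Set String), st.1.Nodup → (l.foldl pvStepA st).1.Nodup := by
      intro l
      induction l with
      | nil => intro st h; exact h
      | cons p l ih =>
        intro st h
        refine ih (pvStepA st p) ?_
        by_cases hc : p.2.2.2.2 ∈ st.2
        · simp only [pvStepA]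
          rw [if_pos (by simpa [PySem.Set.contains_iff] using hc)]
          exact PySem.Set.nodup_add st.1 p.1 h
        · simp only [pvStepA]
          rw [if_neg (by simpa [PySem.Set.contains_iff] using hc)]
          exact h
    rw [pvLoopA, if_pos]
    · exact hfold _ st h1
    · exact hlen
  | case2 st st' hlen ih =>
    intro h1
    rw [pvLoopA, if_neg hlen]
    refine ih ?_
    have hfold : ∀ (l : List (Int × (String × String × String × String)))
        (st : PySem.Set Int × PySem.Set String), st.1.Nodup → (l.foldl pvStepA st).1.Nodup := by
      intro l
      induction l with
      | nil => intro st h; exact h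
      | cons p l ih2 =>
        intro st h
        refine ih2 (pvStepA st p) ?_
        by_cases hc : p.2.2.2.2 ∈ st.2
        · simp only [pvStepA]
          rw [if_pos (by simpa [PySem.Set.contains_iff] using hc)]
          exact PySem.Set.nodup_add st.1 p.1 h
        · simp only [pvStepA]
          rw [if_neg (by simpa [PySem.Set.contains_iff] using hc)]
          exact h
    exact hfold _ st h1

theorem pvLoopA_spec (gates : List (String × String × String × String)) (outs : List String) :
    ∀ st : PySem.Set Int × PySem.Set String,
    (∀ w ∈ st.2, pvReach gates outs w) → (∀ i ∈ st.1, pvQ gates outs i) →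
    (∀ w ∈ outs, w ∈ st.2) →
    (∀ i ∈ pvLoopA gates st, pvQ gates outs i) ∧
      (∀ (k : Nat) (_ : k < gates.length),
        pvReach gates outs (gates[k].2.2.2) → ((k : Int)) ∈ pvLoopA gates st) := by
  intro st
  induction st using pvLoopA.induct gates with
  | case1 st st' hlen =>
    obtain ⟨cg, cw⟩ := st
    intro h2 h3 hb
    obtain ⟨t, ht, _⟩ := pvPassA_ext (PySem.List.enumerate gates) (cg, cw)
    have ht0 : t = [] := by
      have hl := congrArg List.length ht
      rw [hlen] at hl
      simp at hl
      exact hl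
    have hfix : ((PySem.List.enumerate gates).foldl pvStepA (cg, cw)).2 = cw := by
      rw [ht, ht0]; simp
    obtain ⟨hcl, hmem⟩ := pvPassA_fix (PySem.List.enumerate gates) cg cw hfix
    have hres : pvLoopA gates (cg, cw) =
        ((PySem.List.enumerate gates).foldl pvStepA (cg, cw)).1 := by
      rw [pvLoopA, if_pos hlen]
    have hclosed : ∀ g ∈ gates, g.2.2.2 ∈ cw → g.1 ∈ cw ∧ g.2.2.1 ∈ cw := by
      intro g hg hout
      obtain ⟨j, hj, hgj⟩ := List.mem_iff_getElem.mp hg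
      subst hgj
      have hp : ((0 : Int) + (j : Int), gates[j]) ∈ PySem.List.enumerate gates :=
        (PySem.List.mem_enumerate_iff _ _ _).mpr ⟨j, hj, rfl⟩
      exact hcl _ hp hout
    constructor
    · intro i hi
      rw [hres, hmem i] at hi
      rcases hi with hi | ⟨p, hp, hip, hpout⟩
      · exact h3 i hi
      · obtain ⟨k, hk, hpk⟩ := (PySem.List.mem_enumerate_iff _ _ _).mp hp
        subst hpk
        exact ⟨k, hk, by simpa using hip, h2 _ hpout⟩
    · intro k hk hR
      have hWmem : gates[k].2.2.2 ∈ cw :=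
        pvReach_mem gates outs cw hb hclosed _ hR
      rw [hres, hmem]
      exact Or.inr ⟨((0 : Int) + (k : Int), gates[k]),
        (PySem.List.mem_enumerate_iff _ _ _).mpr ⟨k, hk, rfl⟩, by simp, hWmem⟩
  | case2 st st' hlen ih =>
    obtain ⟨cg, cw⟩ := st
    intro h2 h3 hb
    have henum : ∀ p ∈ PySem.List.enumerate gates,
        ∃ (k : Nat), ∃ _ : k < gates.length, p = ((k : Int), gates[k]) := by
      intro p hp
      obtain ⟨k, hk, hpk⟩ := (PySem.List.mem_enumerate_iff _ _ _).mp hp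
      exact ⟨k, hk, by simpa using hpk⟩
    obtain ⟨hs2, hs1⟩ := pvPassA_sound gates outs (PySem.List.enumerate gates) (cg, cw) henum h2 h3
    obtain ⟨t, ht, _⟩ := pvPassA_ext (PySem.List.enumerate gates) (cg, cw)
    have hb' : ∀ w ∈ outs, w ∈ ((PySem.List.enumerate gates).foldl pvStepA (cg, cw)).2 := by
      intro w hw
      rw [ht]
      exact List.mem_append_left _ (hb w hw)
    rw [pvLoopA, if_neg hlen]
    exact ih hs2 hs1 hb'

-- ---- B-side correctness ----

-- the output-wire index lists exactly the (w1, w2) pairs of the gates producing each wire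
theorem pv_byOut_getD (gates : List (String × String × String × String)) (w : String) :
    (gates.foldl (fun d g => d.modify g.2.2.2 [] (· ++ [(g.1, g.2.2.1)])) PySem.Dict.empty).getD w []
      = (gates.filter (fun g => g.2.2.2 == w)).map (fun g => (g.1, g.2.2.1)) := by
  have h1 : gates.foldl (fun d g => d.modify g.2.2.2 [] (· ++ [(g.1, g.2.2.1)])) PySem.Dict.empty
      = (gates.map (fun g => (g.2.2.2, (g.1, g.2.2.1)))).foldl
          (fun d p => d.modify p.1 [] (· ++ [p.2])) PySem.Dict.empty := by
    rw [List.foldl_map]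
  rw [h1, PySem.Dict.getD_foldl_modify_append]
  simp [List.filter_map, Function.comp_def]

-- generic facts preserved by any sequence of guarded pushes (seen grows by appending;
-- stack members persist; stack stays a nodup subset of seen; new seen wires sit on the stack)
def pvTrans (st st' : PySem.Set String × List String) : Prop :=
  (∃ t, st'.1 = st.1 ++ t) ∧
  (∀ y ∈ st.2, y ∈ st'.2) ∧
  (∀ y ∈ st'.2, y ∈ st.2 ∨ y ∈ st'.1) ∧
  (∀ y ∈ st'.1, y ∈ st.1 ∨ y ∈ st'.2) ∧
  ((st.2 ⊆ st.1 ∧ st.2.Nodup) → (st'.2 ⊆ st'.1 ∧ st'.2.Nodup))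

theorem pvTrans_refl (st : PySem.Set String × List String) : pvTrans st st :=
  ⟨⟨[], by simp⟩, fun _ h => h, fun _ h => Or.inl h, fun _ h => Or.inl h, id⟩

theorem pvTrans_trans {s1 s2 s3 : PySem.Set String × List String}
    (h12 : pvTrans s1 s2) (h23 : pvTrans s2 s3) : pvTrans s1 s3 := by
  obtain ⟨⟨t1, e1⟩, a12, b12, c12, d12⟩ := h12
  obtain ⟨⟨t2, e2⟩, a23, b23, c23, d23⟩ := h23
  refine ⟨⟨t1 ++ t2, by rw [e2, e1]; simp⟩, fun y hy => a23 y (a12 y hy), ?_, ?_, fun h => d23 (d12 h)⟩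
  · intro y hy
    rcases b23 y hy with hy | hy
    · rcases b12 y hy with hy | hy
      · exact Or.inl hy
      · exact Or.inr (by rw [e2]; exact List.mem_append_left _ hy)
    · exact Or.inr hy
  · intro y hy
    rcases c23 y hy with hy | hy
    · rcases c12 y hy with hy | hy
      · exact Or.inl hy
      · exact Or.inr (a23 y hy)
    · exact Or.inr hy

theorem pvStep2_trans (st : PySem.Set String × List String) (x : String) :
    pvTrans st (pvStep2 st x) := by
  by_cases h : x ∈ st.1
  · have : pvStep2 st x = st := by simp [pvStep2, h]
    rw [this]; exact pvTrans_refl st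
  · have hst : pvStep2 st x = (st.1 ++ [x], x :: st.2) := by
      simp [pvStep2, PySem.Set.add, h]
    rw [hst]
    refine ⟨⟨[x], rfl⟩, fun y hy => List.mem_cons_of_mem _ hy, ?_, ?_, ?_⟩
    · intro y hy
      rcases List.mem_cons.mp hy with rfl | hy
      · exact Or.inr (List.mem_append_right _ List.mem_cons_self)
      · exact Or.inl hy
    · intro y hy
      rcases List.mem_append.mp hy with hy | hy
      · exact Or.inl hy
      · have := List.mem_singleton.mp hy
        subst this
        exact Or.inr List.mem_cons_self
    · rintro ⟨hsub, hnd⟩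
      constructor
      · intro y hy
        rcases List.mem_cons.mp hy with rfl | hy
        · exact List.mem_append_right _ List.mem_cons_self
        · exact List.mem_append_left _ (hsub hy)
      · exact List.nodup_cons.mpr ⟨fun hx => h (hsub hx), hnd⟩

theorem pvStep2_mem (st : PySem.Set String × List String) (x : String) :
    x ∈ (pvStep2 st x).1 := by
  by_cases h : x ∈ st.1
  · simp only [pvStep2]
    rw [if_pos (by simpa [PySem.Set.contains_iff] using h)]
    exact h
  · simp [pvStep2, PySem.Set.add, h]

theorem pvProcess_trans (prs : List (String × String)) (st : PySem.Set String × List String) :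
    pvTrans st (pvProcess prs st) := by
  induction prs generalizing st with
  | nil => exact pvTrans_refl st
  | cons pr prs ih =>
    have hstep : pvProcess (pr :: prs) st = pvProcess prs (pvStep2 (pvStep2 st pr.1) pr.2) := by
      simp [pvProcess, List.foldl]
    rw [hstep]
    exact pvTrans_trans (pvTrans_trans (pvStep2_trans st pr.1)
      (pvStep2_trans (pvStep2 st pr.1) pr.2)) (ih _)

-- after processing, every listed pair's two wires are seen
theorem pvProcess_pairs (prs : List (String × String)) (st : PySem.Set String × List String) :
    ∀ pr ∈ prs, pr.1 ∈ (pvProcess prs st).1 ∧ pr.2 ∈ (pvProcess prs st).1 := by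
  induction prs generalizing st with
  | nil => intro pr hpr; cases hpr
  | cons q prs ih =>
    intro pr hpr
    have hstep : pvProcess (q :: prs) st = pvProcess prs (pvStep2 (pvStep2 st q.1) q.2) := by
      simp [pvProcess, List.foldl]
    rcases List.mem_cons.mp hpr with rfl | hpr
    · obtain ⟨⟨t, e⟩, _, _, _, _⟩ := pvProcess_trans prs (pvStep2 (pvStep2 st pr.1) pr.2)
      constructor
      · rw [hstep, e]
        refine List.mem_append_left _ ?_
        obtain ⟨⟨t2, e2⟩, _, _, _, _⟩ := pvStep2_trans (pvStep2 st pr.1) pr.2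
        rw [e2]
        exact List.mem_append_left _ (pvStep2_mem st pr.1)
      · rw [hstep, e]
        exact List.mem_append_left _ (pvStep2_mem (pvStep2 st pr.1) pr.2)
    · rw [hstep]
      exact ih _ pr hpr

-- the worklist loop: monotone, sound for any step-closed predicate, and closed at the end
theorem pvBFS_spec (byOut : PySem.Dict String (List (String × String))) (P : String → Prop)
    (hP : ∀ w, P w → ∀ pr ∈ byOut.getD w [], P pr.1 ∧ P pr.2) :
    ∀ st : PySem.Set String × List String,
    st.2 ⊆ st.1 → st.2.Nodup →
    (∀ w ∈ st.1, w ∈ st.2 ∨ ∀ pr ∈ byOut.getD w [], pr.1 ∈ st.1 ∧ pr.2 ∈ st.1) →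
    (∀ w ∈ st.1, P w) →
    (∀ y ∈ st.1, y ∈ pvBFS byOut st) ∧ (∀ y ∈ pvBFS byOut st, P y) ∧
      (∀ w ∈ pvBFS byOut st, ∀ pr ∈ byOut.getD w [], pr.1 ∈ pvBFS byOut st ∧ pr.2 ∈ pvBFS byOut st) := by
  intro st
  induction st using pvBFS.induct byOut with
  | case1 seen =>
    intro _ _ hI hsound
    rw [pvBFS]
    refine ⟨fun y hy => hy, hsound, ?_⟩
    intro w hw pr hpr
    rcases hI w hw with hw2 | hcl
    · cases hw2
    · exact hcl pr hpr
  | case2 seen w rest ih =>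
    intro hsub hnd hI hsound
    have hres : pvBFS byOut (seen, w :: rest) = pvBFS byOut (pvProcess (byOut.getD w []) (seen, rest)) := by
      rw [pvBFS]
    obtain ⟨⟨t, e⟩, ha, hb, hc, hd⟩ := pvProcess_trans (byOut.getD w []) (seen, rest)
    obtain ⟨t', e', n', _⟩ := pvProcess_ext (byOut.getD w []) (seen, rest)
    have hteq : t = t' := by
      rw [e'] at e
      exact (List.append_cancel_left e).symm
    subst hteq
    have hwP : P w := hsound w (hsub List.mem_cons_self)
    have hrsub : rest ⊆ seen := fun y hy => hsub (List.mem_cons_of_mem _ hy)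
    have hrnd : rest.Nodup := (List.nodup_cons.mp hnd).2
    obtain ⟨hsub', hnd'⟩ := hd ⟨hrsub, hrnd⟩
    have hseenmono : ∀ y ∈ seen, y ∈ (pvProcess (byOut.getD w []) (seen, rest)).1 := by
      intro y hy
      rw [e]
      exact List.mem_append_left _ hy
    have hI' : ∀ w' ∈ (pvProcess (byOut.getD w []) (seen, rest)).1,
        w' ∈ (pvProcess (byOut.getD w []) (seen, rest)).2 ∨
          ∀ pr ∈ byOut.getD w' [],
            pr.1 ∈ (pvProcess (byOut.getD w []) (seen, rest)).1 ∧
              pr.2 ∈ (pvProcess (byOut.getD w []) (seen, rest)).1 := by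
      intro w' hw'
      rcases hc w' hw' with hw'seen | hw'stack
      · rcases hI w' hw'seen with hstk | hcl
        · rcases List.mem_cons.mp hstk with rfl | hrest
          · exact Or.inr fun pr hpr => pvProcess_pairs _ _ pr hpr
          · exact Or.inl (ha w' hrest)
        · refine Or.inr fun pr hpr => ?_
          obtain ⟨hm1, hm2⟩ := hcl pr hpr
          exact ⟨hseenmono _ hm1, hseenmono _ hm2⟩
      · exact Or.inl hw'stack
    have hsound' : ∀ y ∈ (pvProcess (byOut.getD w []) (seen, rest)).1, P y := by
      intro y hy
      rw [e] at hy
      rcases List.mem_append.mp hy with hy | hy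
      · exact hsound y hy
      · obtain ⟨_, pr, hpr, hor⟩ := n' y hy
        have hpq := hP w hwP pr hpr
        rcases hor with rfl | rfl
        · exact hpq.1
        · exact hpq.2
    rw [hres]
    obtain ⟨c1, c2, c3⟩ := ih hsub' hnd' hI' hsound'
    exact ⟨fun y hy => c1 y (hseenmono y hy), c2, c3⟩

-- ---- seeding loop and final assembly ----

theorem pvSeed_trans (names : List String) (st : PySem.Set String × List String) :
    pvTrans st (names.foldl pvStep2 st) := by
  induction names generalizing st with
  | nil => exact pvTrans_refl st
  | cons x names ih => exact pvTrans_trans (pvStep2_trans st x) (ih (pvStep2 st x))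

theorem pvSeed_sub (names : List String) (st : PySem.Set String × List String) :
    ∀ y ∈ (names.foldl pvStep2 st).1, y ∈ st.1 ∨ y ∈ names := by
  induction names generalizing st with
  | nil => intro y hy; exact Or.inl hy
  | cons x names ih =>
    intro y hy
    rcases ih (pvStep2 st x) y hy with hy | hy
    · obtain ⟨t, e, n, _⟩ := pvStep2_ext st x
      rw [e] at hy
      rcases List.mem_append.mp hy with hy | hy
      · exact Or.inl hy
      · obtain ⟨_, rfl⟩ := n y hy
        exact Or.inr List.mem_cons_self
    · exact Or.inr (List.mem_cons_of_mem _ hy)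

theorem pvSeed_all (names : List String) (st : PySem.Set String × List String) :
    ∀ y ∈ names, y ∈ (names.foldl pvStep2 st).1 := by
  induction names generalizing st with
  | nil => intro y hy; cases hy
  | cons x names ih =>
    intro y hy
    rcases List.mem_cons.mp hy with rfl | hy
    · obtain ⟨⟨t, e⟩, _, _, _, _⟩ := pvSeed_trans names (pvStep2 st y)
      rw [List.foldl_cons, e]
      exact List.mem_append_left _ (pvStep2_mem st y)
    · exact ih (pvStep2 st x) y hy

-- proof-side names for B's intermediate values
def pvByOut (gates : List (String × String × String × String)) :
    PySem.Dict String (List (String × String)) :=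
  gates.foldl (fun d g => d.modify g.2.2.2 [] (· ++ [(g.1, g.2.2.1)])) PySem.Dict.empty

def pvSeen (gates : List (String × String × String × String)) (outs : List String) :
    PySem.Set String :=
  pvBFS (pvByOut gates) (outs.foldl pvStep2 (PySem.Set.empty, []))

theorem pv_alt_eq (gates : List (String × String × String × String)) (outs : List String) :
    get_correct_gates_from_out_names_alt gates outs =
      ((PySem.List.enumerate gates).filter
        (fun p => PySem.Set.contains (pvSeen gates outs) p.2.2.2.2)).map (fun p => p.1) := by
  unfold get_correct_gates_from_out_names_alt pvSeen pvByOut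
  simpa using PySem.List.foldl_append_if
    (fun p : Int × (String × String × String × String) =>
      PySem.Set.contains (pvBFS (pvByOut gates) (outs.foldl pvStep2 (PySem.Set.empty, [])))
        p.2.2.2.2)
    (fun p : Int × (String × String × String × String) => p.1)
    (PySem.List.enumerate gates) []

-- B's seen set is exactly the reachable wire set
theorem pvSeen_iff (gates : List (String × String × String × String)) (outs : List String) :
    ∀ y, y ∈ pvSeen gates outs ↔ pvReach gates outs y := by
  have hgetD : ∀ w, (pvByOut gates).getD w []
      = (gates.filter (fun g => g.2.2.2 == w)).map (fun g => (g.1, g.2.2.1)) :=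
    fun w => pv_byOut_getD gates w
  have hP : ∀ w, pvReach gates outs w →
      ∀ pr ∈ (pvByOut gates).getD w [], pvReach gates outs pr.1 ∧ pvReach gates outs pr.2 := by
    intro w hw pr hpr
    rw [hgetD w] at hpr
    obtain ⟨g, hg, hprg⟩ := List.mem_map.mp hpr
    obtain ⟨hgg, hgw⟩ := List.mem_filter.mp hg
    have hout : g.2.2.2 = w := by simpa using hgw
    have hRout : pvReach gates outs g.2.2.2 := hout ▸ hw
    rw [← hprg]
    exact ⟨pvReach.left g hgg hRout, pvReach.right g hgg hRout⟩
  have hseed := pvSeed_trans outs (PySem.Set.empty, [])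
  obtain ⟨⟨t, e⟩, _, hb, hc, hd⟩ := hseed
  have hesub : (outs.foldl pvStep2 (PySem.Set.empty, [])).2 ⊆
      (outs.foldl pvStep2 (PySem.Set.empty, [])).1 := by
    exact (hd ⟨by intro y hy; simp at hy, List.nodup_nil⟩).1
  have hend : (outs.foldl pvStep2 (PySem.Set.empty, [])).2.Nodup :=
    (hd ⟨by intro y hy; simp at hy, List.nodup_nil⟩).2
  have hI : ∀ w ∈ (outs.foldl pvStep2 (PySem.Set.empty, [])).1,
      w ∈ (outs.foldl pvStep2 (PySem.Set.empty, [])).2 ∨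
        ∀ pr ∈ (pvByOut gates).getD w [],
          pr.1 ∈ (outs.foldl pvStep2 (PySem.Set.empty, [])).1 ∧
            pr.2 ∈ (outs.foldl pvStep2 (PySem.Set.empty, [])).1 := by
    intro w hw
    rcases hc w hw with hw0 | hw2
    · cases hw0
    · exact Or.inl hw2
  have hsound : ∀ w ∈ (outs.foldl pvStep2 (PySem.Set.empty, [])).1, pvReach gates outs w := by
    intro w hw
    rcases pvSeed_sub outs (PySem.Set.empty, []) w hw with hw | hw
    · cases hw
    · exact pvReach.base w hw
  obtain ⟨b1, b2, b3⟩ := pvBFS_spec (pvByOut gates) (pvReach gates outs) hP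
    (outs.foldl pvStep2 (PySem.Set.empty, [])) hesub hend hI hsound
  intro y
  constructor
  · exact b2 y
  · intro hy
    refine pvReach_mem gates outs (pvSeen gates outs) ?_ ?_ y hy
    · intro w hw
      exact b1 w (pvSeed_all outs (PySem.Set.empty, []) w hw)
    · intro g hg hout
      have hpr : (g.1, g.2.2.1) ∈ (pvByOut gates).getD g.2.2.2 [] := by
        rw [hgetD]
        exact List.mem_map.mpr ⟨g, List.mem_filter.mpr ⟨hg, by simp⟩, rfl⟩
      exact b3 g.2.2.2 hout (g.1, g.2.2.1) hpr

-- A's gate set contains exactly the indices of gates with reachable outputs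
theorem pvA_iff (gates : List (String × String × String × String)) (outs : List String) :
    ∀ i, i ∈ pvLoopA gates (PySem.Set.empty, PySem.Set.ofList outs) ↔ pvQ gates outs i := by
  have hsw : ∀ w ∈ PySem.Set.ofList outs, pvReach gates outs w := by
    intro w hw
    exact pvReach.base w ((PySem.Set.mem_ofList _ _).mp hw)
  have hsi : ∀ i ∈ (PySem.Set.empty : PySem.Set Int), pvQ gates outs i := by
    intro i hi; cases hi
  have hob : ∀ w ∈ outs, w ∈ PySem.Set.ofList outs :=
    fun w hw => (PySem.Set.mem_ofList _ _).mpr hw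
  obtain ⟨a1, a2⟩ := pvLoopA_spec gates outs (PySem.Set.empty, PySem.Set.ofList outs) hsw hsi hob
  intro i
  constructor
  · exact a1 i
  · rintro ⟨k, hk, rfl, hR⟩
    exact a2 k hk hR

-- ===== VERDICT (by name: the statement is the Claim_ definition above) =====
theorem get_correct_gates_from_out_names_spec : Claim_equal_get_correct_gates_from_out_names := by
  intro gates outs _hdom
  unfold Spec_get_correct_gates_from_out_names
  rw [pv_alt_eq]
  have hcg := pvA_iff gates outs
  have hnodupcg : (pvLoopA gates (PySem.Set.empty, PySem.Set.ofList outs)).Nodup :=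
    pvLoopA_nodup gates _ List.nodup_nil
  have hpairBL : (((PySem.List.enumerate gates).filter
      (fun p => PySem.Set.contains (pvSeen gates outs) p.2.2.2.2)).map
        (fun p => p.1)).Pairwise (fun a b : Int => a < b) := by
    refine List.pairwise_map.mpr ?_
    exact List.Pairwise.sublist List.filter_sublist (PySem.List.pairwise_lt_enumerate gates 0)
  have hndBL : (((PySem.List.enumerate gates).filter
      (fun p => PySem.Set.contains (pvSeen gates outs) p.2.2.2.2)).map
        (fun p => p.1)).Nodup :=
    hpairBL.imp (fun h => ne_of_lt h)
  have hmemBL : ∀ i : Int, i ∈ ((PySem.List.enumerate gates).filter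
      (fun p => PySem.Set.contains (pvSeen gates outs) p.2.2.2.2)).map (fun p => p.1) ↔
        pvQ gates outs i := by
    intro i
    constructor
    · intro hi
      obtain ⟨p, hp, hpi⟩ := List.mem_map.mp hi
      obtain ⟨hpe, hps⟩ := List.mem_filter.mp hp
      obtain ⟨k, hk, hpk⟩ := (PySem.List.mem_enumerate_iff _ _ _).mp hpe
      subst hpk
      have hR : pvReach gates outs (gates[k].2.2.2) :=
        (pvSeen_iff gates outs _).mp ((PySem.Set.contains_iff _ _).mp hps)
      exact ⟨k, hk, by simpa using hpi.symm, hR⟩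
    · rintro ⟨k, hk, rfl, hR⟩
      refine List.mem_map.mpr ⟨((0 : Int) + (k : Int), gates[k]), ?_, by simp⟩
      refine List.mem_filter.mpr ⟨(PySem.List.mem_enumerate_iff _ _ _).mpr ⟨k, hk, rfl⟩, ?_⟩
      exact (PySem.Set.contains_iff _ _).mpr ((pvSeen_iff gates outs _).mpr hR)
  have hperm : (((PySem.List.enumerate gates).filter
      (fun p => PySem.Set.contains (pvSeen gates outs) p.2.2.2.2)).map (fun p => p.1)).Perm
        (pvLoopA gates (PySem.Set.empty, PySem.Set.ofList outs)) :=
    (List.perm_ext_iff_of_nodup hndBL hnodupcg).mpr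
      (fun a => (hmemBL a).trans (hcg a).symm)
  exact PySem.List.sorted_eq_of_perm_of_pairwise_lt _ _ _ hperm hpairBL
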